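-- pv_equiv track=rewrite | github.com/AsherIDE/DataVis | Assignments/Assignment 2/dfsTreePositioning.py | organizeBfsOutput
-- ===== SOURCE A (Python) =====
-- def organizeBfsOutput(input):
--     output = []
--     level = {}
--     lower_level_nodes = []
--
--     for edge in input:
--         top_node, bottom_node = edge[0], edge[1]
--
--         # check if a new node has to be added to the list of nodes for the current level
--         if top_node not in lower_level_nodes:
--             if top_node in level.keys():
--                 level[top_node] = level[top_node] + [bottom_node]
--
--             else:
--                 level[top_node] = [bottom_node]
--
--             # list of nodes that shouldnt be on the current level
--             lower_level_nodes.append(bottom_node)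
--
--         # descend to new level
--         else:
--             output.append(level)
--             level = {}
--             lower_level_nodes = []
--
--             # add the current top node to the next level already (in the next iteration it will otherwise be forgotten)
--             level[top_node] = [bottom_node]
--
--     # add the last level after the last iteration
--     output.append(level)
--
--     return output
-- ===== SOURCE B (Python) =====
-- def _group(seg):
--     # group each edge's bottom under its top, in first-occurrence order
--     level = {}
--     for (t, b) in seg:
--         level.setdefault(t, []).append(b)
--     return level
--
--
-- def organizeBfsOutput(input):
--     # pass 1: cut the edge stream into level segments
--     closed = []
--     cur = []
--     seen = set()
--     for edge in input:
--         t, b = edge[0], edge[1]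
--         if t in seen:
--             closed.append(cur)
--             cur = [(t, b)]
--             seen = set()
--         else:
--             cur.append((t, b))
--             seen.add(b)
--     segments = closed + [cur]
--     # pass 2: turn each segment into its per-level dict
--     return [_group(seg) for seg in segments]
-- ===== Notes on version B (the rewrite author's own statement) =====
-- stated objective: alternative
-- what changed: A builds each level's dict and the seen-node list interleaved in one loop; B first segments the edge stream into per-level runs (closing a run when a top node was already seen as a bottom), then in a second pass groups each run into its dict with setdefault.
import Mathlib
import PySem

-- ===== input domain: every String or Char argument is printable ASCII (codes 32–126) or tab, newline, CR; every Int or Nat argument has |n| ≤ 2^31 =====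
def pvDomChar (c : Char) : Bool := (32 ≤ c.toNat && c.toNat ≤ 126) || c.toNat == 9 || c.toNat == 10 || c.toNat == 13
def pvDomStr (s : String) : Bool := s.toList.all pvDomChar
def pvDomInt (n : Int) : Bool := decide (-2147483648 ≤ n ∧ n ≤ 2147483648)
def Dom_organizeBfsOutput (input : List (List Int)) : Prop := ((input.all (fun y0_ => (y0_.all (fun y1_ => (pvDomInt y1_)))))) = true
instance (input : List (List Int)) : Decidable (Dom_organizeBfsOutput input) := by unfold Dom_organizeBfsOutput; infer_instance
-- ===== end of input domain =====

-- B replaces A's single interleaved loop by two passes — segment the edge stream, then group each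
-- segment into its dict — a different decomposition of the same cost (objective: alternative).


-- ===== PORT A =====
-- A's loop: state (output, level, lower_level_nodes); edge[0]/edge[1] are total here because
-- Pre_ demands every edge have length ≥ 2 (Python raises IndexError otherwise).
def loopA : List (List Int) → List (PySem.Dict Int (List Int)) → PySem.Dict Int (List Int) →
    List Int → List (PySem.Dict Int (List Int))
  | [], output, level, _ => output ++ [level]
  | edge :: rest, output, level, lln =>
    let t := PySem.List.pyGetD edge 0 0
    let b := PySem.List.pyGetD edge 1 0
    if t ∉ lln then
      loopA rest output
        (if level.contains t then level.insert t (level.getD t [] ++ [b]) else level.insert t [b])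
        (lln ++ [b])
    else
      loopA rest (output ++ [level]) (PySem.Dict.empty.insert t [b]) []

def organizeBfsOutput (input : List (List Int)) : List (List (Int × List Int)) :=
  (loopA input [] PySem.Dict.empty []).map (·.items)

-- ===== PORT B =====
-- pass 2 helper: group each edge's bottom under its top
def groupB (seg : List (Int × Int)) : PySem.Dict Int (List Int) :=
  seg.foldl (fun d p => d.modify p.1 [] (· ++ [p.2])) PySem.Dict.empty

-- pass 1: cut the edge stream into segments (closed segments, current segment, seen set)
def segLoop : List (List Int) → List (List (Int × Int)) → List (Int × Int) → PySem.Set Int →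
    List (List (Int × Int))
  | [], closed, cur, _ => closed ++ [cur]
  | edge :: rest, closed, cur, seen =>
    let t := PySem.List.pyGetD edge 0 0
    let b := PySem.List.pyGetD edge 1 0
    if t ∈ seen then
      segLoop rest (closed ++ [cur]) [(t, b)] PySem.Set.empty
    else
      segLoop rest closed (cur ++ [(t, b)]) (seen.add b)

def organizeBfsOutput_alt (input : List (List Int)) : List (List (Int × List Int)) :=
  (segLoop input [] [] PySem.Set.empty).map (fun seg => (groupB seg).items)

-- ===== PRECONDITION & SPEC =====
-- Pre_: every edge must have at least two entries; Python A raises IndexError on edge[1] otherwise.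
def Pre_organizeBfsOutput (input : List (List Int)) : Prop :=
  ∀ e ∈ input, 2 ≤ e.length
instance (input : List (List Int)) : Decidable (Pre_organizeBfsOutput input) := by
  unfold Pre_organizeBfsOutput; infer_instance

def pvWitness_organizeBfsOutput : List (List Int) := [[1, 2], [1, 3], [2, 4]]

def Spec_organizeBfsOutput (input : List (List Int)) (out : List (List (Int × List Int))) : Prop :=
  out = organizeBfsOutput_alt input
instance (input : List (List Int)) (out : List (List (Int × List Int))) : Decidable (Spec_organizeBfsOutput input out) := by unfold Spec_organizeBfsOutput; infer_instance

-- ===== CLAIM (what is proved, stated in full; the proofs are below) =====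
def Claim_equal_organizeBfsOutput : Prop := ∀ (input : List (List Int)), Dom_organizeBfsOutput input → Pre_organizeBfsOutput input → Spec_organizeBfsOutput input (organizeBfsOutput input)

-- ===== LEMMAS AND PROOFS =====

-- appending one edge to a segment updates its grouped dict exactly as A's branch does
theorem groupB_append (cur : List (Int × Int)) (t b : Int) :
    groupB (cur ++ [(t, b)]) =
      (if (groupB cur).contains t then
        (groupB cur).insert t ((groupB cur).getD t [] ++ [b])
      else (groupB cur).insert t [b]) := by
  have h : groupB (cur ++ [(t, b)]) = (groupB cur).modify t [] (· ++ [b]) := by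
    simp [groupB, List.foldl_append]
  rw [h]
  by_cases hc : (groupB cur).contains t
  · simp [PySem.Dict.modify, hc]
  · have hc' : (groupB cur).contains t = false := by simpa using hc
    have hg : (groupB cur).getD t [] = [] := PySem.Dict.getD_of_not_contains _ _ hc'
    rw [PySem.Dict.modify, hg, hc']
    simp

-- main invariant: A's interleaved loop equals segmentation-then-grouping
theorem loopA_eq_segLoop (input : List (List Int)) :
    ∀ (closed : List (List (Int × Int))) (cur : List (Int × Int)) (seen : PySem.Set Int)
      (lln : List Int), (∀ x : Int, x ∈ seen ↔ x ∈ lln) →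
      loopA input (closed.map groupB) (groupB cur) lln =
        (segLoop input closed cur seen).map groupB := by
  induction input with
  | nil =>
    intro closed cur seen lln _
    simp [loopA, segLoop]
  | cons edge rest ih =>
    intro closed cur seen lln hinv
    simp only [loopA, segLoop]
    by_cases ht : PySem.List.pyGetD edge 0 0 ∈ lln
    · have hts : PySem.List.pyGetD edge 0 0 ∈ seen := (hinv _).mpr ht
      rw [if_neg (by simpa using ht), if_pos hts]
      have h1 : (PySem.Dict.empty.insert (PySem.List.pyGetD edge 0 0)
          [PySem.List.pyGetD edge 1 0] : PySem.Dict Int (List Int)) =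
          groupB [(PySem.List.pyGetD edge 0 0, PySem.List.pyGetD edge 1 0)] := by
        simp [groupB, PySem.Dict.modify, PySem.Dict.getD_empty]
      have h2 : (closed.map groupB) ++ [groupB cur] = (closed ++ [cur]).map groupB := by
        simp
      rw [h1, h2]
      exact ih (closed ++ [cur]) _ PySem.Set.empty [] (by simp [PySem.Set.empty])
    · have hts : PySem.List.pyGetD edge 0 0 ∉ seen := fun hx => ht ((hinv _).mp hx)
      rw [if_pos (by simpa using ht), if_neg hts]
      rw [← groupB_append]
      refine ih closed (cur ++ [(_, _)]) (seen.add _) (lln ++ [_]) ?_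
      intro x
      rw [PySem.Set.mem_add]
      simp [hinv x]

-- ===== VERDICT (by name: the statement is the Claim_ definition above) =====
theorem organizeBfsOutput_spec : Claim_equal_organizeBfsOutput := by
  intro input _ _
  unfold Spec_organizeBfsOutput organizeBfsOutput organizeBfsOutput_alt
  have h := loopA_eq_segLoop input [] [] PySem.Set.empty [] (by simp [PySem.Set.empty])
  simp only [List.map_nil] at h
  rw [show (PySem.Dict.empty : PySem.Dict Int (List Int)) = groupB [] from rfl, h]
  simp
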